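-- pv_equiv track=rewrite | github.com/Jwuthri/RAGNarok | src/utils/markdown_utils.py | align_markdown_table
-- ===== SOURCE A (Python) =====
-- def align_markdown_table(md_table: str) -> str:
--     """
--     Takes a markdown table as input and returns a perfectly aligned markdown table.
--
--     :param md_table: Multiline string representing the markdown table.
--     :return: A string of the perfectly aligned markdown table.
--     """
--     # Split the table into lines
--     lines = md_table.strip().split("\n")
--
--     # Extract the headers and rows
--     headers = lines[0].split("|")[1:-1]  # Ignore empty strings due to leading and trailing |
--     rows = [line.split("|")[1:-1] for line in lines[2:]]  # The actual data rows
--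
--     # Determine the maximum width for each column
--     col_widths = [
--         max(len(header.strip()), *(len(cell.strip()) for cell in col)) for header, col in zip(headers, zip(*rows))
--     ]
--
--     # Rebuild the table with aligned columns
--     aligned_table = []
--     aligned_table.append(
--         "| " + " | ".join(header.strip().ljust(width) for header, width in zip(headers, col_widths)) + " |"
--     )
--     aligned_table.append("|-" + "-|-".join("-" * width for width in col_widths) + "-|")
--
--     for row in rows:
--         aligned_table.append(
--             "| " + " | ".join(cell.strip().ljust(width) for cell, width in zip(row, col_widths)) + " |"
--         )
--
--     return "\n".join(aligned_table)
-- ===== SOURCE B (Python) =====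
-- def align_markdown_table(md_table: str) -> str:
--     """Row-major single pass: accumulate column widths over rows instead of transposing.
--     Intended fix: a table with no data rows keeps its header widths instead of collapsing."""
--     lines = md_table.strip().split("\n")
--     headers = [h.strip() for h in lines[0].split("|")[1:-1]]
--     rows = [line.split("|")[1:-1] for line in lines[2:]]
--
--     if rows:
--         acc = [len(c.strip()) for c in rows[0]]
--         for row in rows[1:]:
--             acc = [max(w, len(c.strip())) for w, c in zip(acc, row)]
--         widths = [max(len(h), w) for h, w in zip(headers, acc)]
--     else:
--         widths = [len(h) for h in headers]
--
--     out = ["| " + " | ".join(h.ljust(w) for h, w in zip(headers, widths)) + " |",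
--            "|-" + "-|-".join("-" * w for w in widths) + "-|"]
--     for row in rows:
--         out.append("| " + " | ".join(c.strip().ljust(w) for c, w in zip(row, widths)) + " |")
--     return "\n".join(out)
-- ===== Notes on version B (the rewrite author's own statement) =====
-- stated objective: alternative
-- what changed: Replaces the zip(*rows) transpose plus per-column generator-max with a single row-major accumulating pass that folds each data row into a running width list (zip truncation keeps the effective column count), stripping headers once up front.
-- intended difference: On tables with no data rows (at most 2 lines after strip) whose header row has cells and is not a single blank cell, A collapses the output to an empty header cell plus a bare two-dash separator, dropping the header text, while B returns the header padded to its own widths with a matching separator, which is the intended alignment. — e.g. on align_markdown_table("| A |"): A returns "| |\n|--|", B returns "| A |\n|---|"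
import Mathlib
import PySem

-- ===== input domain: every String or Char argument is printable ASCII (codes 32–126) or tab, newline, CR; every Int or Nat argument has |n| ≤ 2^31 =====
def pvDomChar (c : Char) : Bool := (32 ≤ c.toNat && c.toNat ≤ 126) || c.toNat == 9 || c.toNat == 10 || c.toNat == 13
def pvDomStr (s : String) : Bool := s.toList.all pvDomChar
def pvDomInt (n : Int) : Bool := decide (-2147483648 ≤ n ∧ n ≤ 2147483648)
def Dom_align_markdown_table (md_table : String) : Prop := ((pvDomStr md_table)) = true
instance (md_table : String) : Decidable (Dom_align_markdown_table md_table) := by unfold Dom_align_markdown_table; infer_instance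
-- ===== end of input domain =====

-- B replaces A's transpose-then-reduce width computation by a single row-major accumulating
-- pass (objective: alternative decomposition); on tables with no data rows B keeps the header
-- at its own widths where A collapses it (stated as D_ below).

-- ===== PORT A =====
-- shared parsing/formatting helpers: these lines are verbatim identical in both Pythons
-- line.split("|")[1:-1]
def pvSplitRow (l : List Char) : List (List Char) :=
  PySem.List.slice (PySem.Chars.splitOn l ['|']) (some 1) (some (-1))
-- s.ljust(w)  (exact for w ≥ len: right-pad with spaces; Python ljust never truncates)
def pvLJ (c : List Char) (w : Nat) : List Char := c ++ List.replicate (w - c.length) ' '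
-- "| " + " | ".join(cell.ljust(width) for cell, width in zip(cells, widths)) + " |"
def pvCells (cells : List (List Char)) (ws : List Nat) : List Char :=
  ['|', ' '] ++ PySem.Chars.join [' ', '|', ' '] ((cells.zip ws).map (fun p => pvLJ p.1 p.2)) ++ [' ', '|']
-- "|-" + "-|-".join("-" * width for width in widths) + "-|"
def pvSep (ws : List Nat) : List Char :=
  ['|', '-'] ++ PySem.Chars.join ['-', '|', '-'] (ws.map (fun w => List.replicate w '-')) ++ ['-', '|']

-- heads of all rows: some = every row nonempty (zip(*rows) continues), none = some row exhausted
def pvHeads {α : Type} : List (List α) → Option (List α)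
  | [] => some []
  | [] :: _ => none
  | (x :: _) :: rest => (pvHeads rest).map (x :: ·)

-- zip(*rows): Python's zip over the unpacked rows, tuples rendered as lists (hand port; exact:
-- the fuel only bounds the number of zip steps — it can never be the first row's length that
-- stops the zip without the first row also being exhausted)
def pvZipStarGo {α : Type} : Nat → List (List α) → List (List α)
  | 0, _ => []
  | fuel + 1, rows =>
    match pvHeads rows with
    | none => []
    | some hs => hs :: pvZipStarGo fuel (rows.map (List.drop 1))

def pvZipStar {α : Type} (rows : List (List α)) : List (List α) :=
  pvZipStarGo (rows.headD []).length rows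

def align_markdown_table (md_table : String) : String :=
  let lines := PySem.Chars.splitOn (PySem.Chars.strip md_table.toList) ['\n']
  -- lines[0] is safe: str.split never returns an empty list
  let headers := pvSplitRow (lines.headD [])
  let rows := (lines.drop 2).map pvSplitRow
  -- col_widths = [max(len(header.strip()), *(len(cell.strip()) for cell in col)) for header, col in zip(headers, zip(*rows))]
  let colWidths := (headers.zip (pvZipStar rows)).map
    (fun p => (p.2.map (fun c => (PySem.Chars.strip c).length)).foldl max (PySem.Chars.strip p.1).length)
  let table :=
    pvCells (headers.map PySem.Chars.strip) colWidths
      :: pvSep colWidths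
      :: rows.map (fun row => pvCells (row.map PySem.Chars.strip) colWidths)
  String.ofList (PySem.Chars.join ['\n'] table)

-- ===== PORT B =====
def align_markdown_table_alt (md_table : String) : String :=
  let lines := PySem.Chars.splitOn (PySem.Chars.strip md_table.toList) ['\n']
  let headers := (pvSplitRow (lines.headD [])).map PySem.Chars.strip
  let rows := (lines.drop 2).map pvSplitRow
  let widths :=
    match rows with
    | [] => headers.map List.length
    | r0 :: rest =>
      let acc := rest.foldl
        (fun a row => List.zipWith (fun w c => max w (PySem.Chars.strip c).length) a row)
        (r0.map (fun c => (PySem.Chars.strip c).length))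
      List.zipWith (fun h w => max h.length w) headers acc
  let out :=
    pvCells headers widths
      :: pvSep widths
      :: rows.map (fun row => pvCells (row.map PySem.Chars.strip) widths)
  String.ofList (PySem.Chars.join ['\n'] out)

-- ===== PRECONDITION & SPEC =====
-- On tables with no data rows (at most 2 lines after strip) whose header row has cells and is
-- not a single blank cell, A collapses the output to an empty header cell plus a bare two-dash
-- separator, dropping the header text; B keeps the header padded to its own widths with a
-- matching separator, which is the intended alignment.
def D_align_markdown_table (md_table : String) : Prop :=
  let t := PySem.Chars.strip md_table.toList
  let hdr := t.takeWhile (· ≠ '\n')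
  t.count '\n' ≤ 1 ∧ 2 ≤ hdr.count '|' ∧
    ¬(hdr.count '|' = 2 ∧
        PySem.Chars.strip (((hdr.dropWhile (· ≠ '|')).drop 1).takeWhile (· ≠ '|')) = [])
instance (md_table : String) : Decidable (D_align_markdown_table md_table) := by
  unfold D_align_markdown_table; infer_instance

def Spec_align_markdown_table (md_table : String) (out : String) : Prop :=
  ¬ D_align_markdown_table md_table → out = align_markdown_table_alt md_table
instance (md_table : String) (out : String) : Decidable (Spec_align_markdown_table md_table out) := by
  unfold Spec_align_markdown_table; infer_instance

def pvDiffWitness_align_markdown_table : String := "| A |"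
def pvDiffWitnessOut_align_markdown_table : String × String := ("|  |\n|--|", "| A |\n|---|")

-- ===== CLAIM (what is proved, stated in full; the proofs are below) =====
def Claim_unchanged_align_markdown_table : Prop := ∀ (md_table : String), Dom_align_markdown_table md_table → Spec_align_markdown_table md_table (align_markdown_table md_table)
def Claim_changed_align_markdown_table : Prop := Dom_align_markdown_table (pvDiffWitness_align_markdown_table) ∧ D_align_markdown_table (pvDiffWitness_align_markdown_table) ∧ align_markdown_table (pvDiffWitness_align_markdown_table) = pvDiffWitnessOut_align_markdown_table.1 ∧ align_markdown_table_alt (pvDiffWitness_align_markdown_table) = pvDiffWitnessOut_align_markdown_table.2 ∧ pvDiffWitnessOut_align_markdown_table.1 ≠ pvDiffWitnessOut_align_markdown_table.2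

-- ===== LEMMAS AND PROOFS =====

theorem pvZipStar_nil {α : Type} : pvZipStar ([] : List (List α)) = [] := rfl

def splitC (c : Char) : List Char → List (List Char)
  | [] => [[]]
  | x :: xs =>
    if x = c then [] :: splitC c xs
    else
      match splitC c xs with
      | [] => [[x]]
      | h :: t => (x :: h) :: t

theorem splitC_ne_nil (c : Char) (l : List Char) : splitC c l ≠ [] := by
  induction l with
  | nil => simp [splitC]
  | cons x xs ih =>
    simp only [splitC]
    split_ifs
    · simp
    · cases h : splitC c xs <;> simp

theorem splitC_length (c : Char) (l : List Char) : (splitC c l).length = l.count c + 1 := by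
  induction l with
  | nil => simp [splitC]
  | cons x xs ih =>
    simp only [splitC]
    split_ifs with h
    · simp [h, ih]
    · cases hs : splitC c xs with
      | nil => exact absurd hs (splitC_ne_nil c xs)
      | cons a t =>
        rw [hs] at ih
        simp only [List.length_cons] at ih ⊢
        simp [h]
        omega

theorem splitC_headD (c : Char) (l : List Char) :
    (splitC c l).headD [] = l.takeWhile (· ≠ c) := by
  induction l with
  | nil => simp [splitC]
  | cons x xs ih =>
    simp only [splitC]
    split_ifs with h
    · simp [List.takeWhile, h]
    · cases hs : splitC c xs with
      | nil => exact absurd hs (splitC_ne_nil c xs)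
      | cons a t =>
        rw [hs] at ih
        simp only [List.headD_cons] at ih
        simp [List.takeWhile, h, ih]

theorem splitC_getElem1 (c : Char) (l : List Char) (h : 1 ≤ l.count c) :
    (splitC c l)[1]? = some (((l.dropWhile (· ≠ c)).drop 1).takeWhile (· ≠ c)) := by
  induction l with
  | nil => simp at h
  | cons x xs ih =>
    simp only [splitC]
    split_ifs with hx
    · cases hs : splitC c xs with
      | nil => exact absurd hs (splitC_ne_nil c xs)
      | cons a t =>
        have hh := splitC_headD c xs
        rw [hs] at hh
        simp only [List.headD_cons] at hh
        simp [List.dropWhile, hx, hh]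
    · have hcnt : 1 ≤ xs.count c := by
        simpa [List.count_cons, hx] using h
      cases hs : splitC c xs with
      | nil => exact absurd hs (splitC_ne_nil c xs)
      | cons a t =>
        rw [hs] at ih
        have hih := ih hcnt
        simp only [List.getElem?_cons_succ] at hih ⊢
        simp [List.dropWhile, hx]
        simpa using hih

theorem pvSlice_one_negOne {α : Type} (xs : List α) :
    PySem.List.slice xs (some 1) (some (-1)) = (xs.drop 1).dropLast := by
  cases xs with
  | nil => rfl
  | cons x t =>
    simp [PySem.List.slice, PySem.List.clampIdx, List.dropLast_eq_take]
    split_ifs with hneg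
    · omega
    · omega

def goModel (cur : List Char) (acc : List (List Char)) (r : List (List Char)) : List (List Char) :=
  acc.reverse ++ (match r with
    | [] => []
    | h :: t => (cur.reverse ++ h) :: t)

theorem splitOn_go_eq (c : Char) :
    ∀ (fuel : Nat) (l cur : List Char) (acc : List (List Char)), l.length ≤ fuel →
      PySem.Chars.splitOn.go [c] fuel l cur acc = goModel cur acc (splitC c l) := by
  intro fuel
  induction fuel with
  | zero =>
    intro l cur acc hl
    have : l = [] := by cases l <;> simp_all
    subst this
    simp [PySem.Chars.splitOn.go, goModel, splitC]
  | succ fuel ih =>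
    intro l cur acc hl
    cases l with
    | nil => simp [PySem.Chars.splitOn.go, goModel, splitC]
    | cons x xs =>
      rw [PySem.Chars.splitOn.go]
      by_cases hx : x = c
      · rw [if_pos (by simp [List.isPrefixOf, hx])]
        have hl' : xs.length ≤ fuel := by simp at hl; omega
        have hdrop1 : List.drop ([c].length) (x :: xs) = xs := by simp
        rw [hdrop1, ih xs [] (cur.reverse :: acc) hl']
        cases hsp : splitC c xs with
        | nil => exact absurd hsp (splitC_ne_nil c xs)
        | cons a t => simp [goModel, splitC, hx, hsp]
      · rw [if_neg (by simp [List.isPrefixOf]; exact fun h => absurd h.symm hx)]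
        have hl' : xs.length ≤ fuel := by simp at hl; omega
        rw [ih xs (x :: cur) acc hl']
        cases hsp : splitC c xs with
        | nil => exact absurd hsp (splitC_ne_nil c xs)
        | cons a t => simp [goModel, splitC, hx, hsp]

theorem splitOn_eq_splitC (l : List Char) (c : Char) :
    PySem.Chars.splitOn l [c] = splitC c l := by
  rw [PySem.Chars.splitOn, splitOn_go_eq c (l.length + 1) l [] [] (by omega)]
  cases h : splitC c l with
  | nil => exact absurd h (splitC_ne_nil c l)
  | cons a t => simp [goModel]

theorem pvNoData_cases (t : List Char)
    (hlen : (PySem.Chars.splitOn t ['\n']).length ≤ 2)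
    (hnD : ¬(t.count '\n' ≤ 1 ∧ 2 ≤ (t.takeWhile (· ≠ '\n')).count '|' ∧
        ¬((t.takeWhile (· ≠ '\n')).count '|' = 2 ∧
          PySem.Chars.strip ((((t.takeWhile (· ≠ '\n')).dropWhile (· ≠ '|')).drop 1).takeWhile (· ≠ '|')) = []))) :
    (pvSplitRow ((PySem.Chars.splitOn t ['\n']).headD [])).map PySem.Chars.strip = [] ∨
      (pvSplitRow ((PySem.Chars.splitOn t ['\n']).headD [])).map PySem.Chars.strip = [[]] := by
  rw [splitOn_eq_splitC, splitC_length] at hlen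
  have hc1 : t.count '\n' ≤ 1 := by omega
  rw [splitOn_eq_splitC, splitC_headD]
  have hpush : ¬(2 ≤ (t.takeWhile (· ≠ '\n')).count '|' ∧
      ¬((t.takeWhile (· ≠ '\n')).count '|' = 2 ∧
        PySem.Chars.strip ((((t.takeWhile (· ≠ '\n')).dropWhile (· ≠ '|')).drop 1).takeWhile (· ≠ '|')) = [])) :=
    fun h => hnD ⟨hc1, h⟩
  unfold pvSplitRow
  rw [splitOn_eq_splitC, pvSlice_one_negOne]
  by_cases h2 : 2 ≤ (t.takeWhile (· ≠ '\n')).count '|'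
  · have h3 : (t.takeWhile (· ≠ '\n')).count '|' = 2 ∧
        PySem.Chars.strip ((((t.takeWhile (· ≠ '\n')).dropWhile (· ≠ '|')).drop 1).takeWhile (· ≠ '|')) = [] := by
      by_contra hno
      exact hpush ⟨h2, hno⟩
    have hlen3 : (splitC '|' (t.takeWhile (· ≠ '\n'))).length = 3 := by
      rw [splitC_length]; omega
    obtain ⟨a, b, c, habc⟩ := List.length_eq_three.mp hlen3
    have hb := splitC_getElem1 '|' (t.takeWhile (· ≠ '\n')) (by omega)
    rw [habc] at hb
    simp only [List.getElem?_cons_succ, List.getElem?_cons_zero, Option.some.injEq] at hb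
    right
    rw [habc]
    simp only [List.drop_succ_cons, List.drop_zero, List.dropLast_cons₂, List.dropLast_singleton,
      List.map_cons, List.map_nil]
    rw [hb]
    simpa using h3.2
  · left
    have hl2 : (splitC '|' (t.takeWhile (· ≠ '\n'))).length ≤ 2 := by
      rw [splitC_length]; omega
    have h0 : (((splitC '|' (t.takeWhile (· ≠ '\n'))).drop 1).dropLast).length = 0 := by
      simp only [List.length_dropLast, List.length_drop]; omega
    rw [List.length_eq_zero_iff.mp h0]
    rfl

-- running min of row lengths starting from n (the length zip(*rows) truncates to)
def pvMinW {α : Type} (n : Nat) (rows : List (List α)) : Nat :=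
  rows.foldl (fun m t => min m t.length) n

theorem pvMinW_le_init {α : Type} (rows : List (List α)) (n : Nat) : pvMinW n rows ≤ n := by
  induction rows generalizing n with
  | nil => simp [pvMinW]
  | cons r rest ih =>
    have h := ih (min n r.length)
    simp only [pvMinW, List.foldl_cons] at h ⊢
    omega

theorem pvMinW_le_mem {α : Type} {rows : List (List α)} {r : List α} (hr : r ∈ rows) (n : Nat) :
    pvMinW n rows ≤ r.length := by
  induction rows generalizing n with
  | nil => cases hr
  | cons t rest ih =>
    rcases List.mem_cons.mp hr with rfl | hmem
    · have h := pvMinW_le_init rest (min n r.length)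
      simp only [pvMinW, List.foldl_cons] at h ⊢
      omega
    · exact ih hmem (min n t.length)

theorem pvMinW_drop {α : Type} {rows : List (List α)} (hall : ∀ r ∈ rows, r ≠ []) :
    ∀ n : Nat, 1 ≤ n →
      1 ≤ pvMinW n rows ∧
        pvMinW (n - 1) (rows.map (List.drop 1)) = pvMinW n rows - 1 := by
  induction rows with
  | nil => intro n hn; simp [pvMinW]; omega
  | cons r rest ih =>
    intro n hn
    have hr : 1 ≤ r.length := by
      have := hall r (by simp)
      cases r with
      | nil => simp at this
      | cons a as => simp
    have ih' := ih (fun t ht => hall t (by simp [ht])) (min n r.length) (by omega)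
    simp only [pvMinW, List.foldl_cons, List.map_cons, List.length_drop] at ih' ⊢
    have hmin : min (n - 1) (r.length - 1) = min n r.length - 1 := by omega
    rw [hmin]
    exact ih'

theorem pvHeads_none {α : Type} : ∀ {rows : List (List α)}, (∃ r ∈ rows, r = []) → pvHeads rows = none := by
  intro rows
  induction rows with
  | nil => rintro ⟨r, hr, _⟩; cases hr
  | cons r rest ih =>
    rintro ⟨t, ht, hte⟩
    rcases List.mem_cons.mp ht with rfl | hmem
    · subst hte; rfl
    · cases r with
      | nil => rfl
      | cons x xs => simp [pvHeads, ih ⟨t, hmem, hte⟩]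

theorem pvHeads_some {α : Type} (d : α) : ∀ {rows : List (List α)}, (∀ r ∈ rows, r ≠ []) →
    pvHeads rows = some (rows.map (fun r => r.headD d)) := by
  intro rows
  induction rows with
  | nil => intro _; rfl
  | cons r rest ih =>
    intro hall
    cases r with
    | nil => exact absurd rfl (hall [] (by simp))
    | cons x xs =>
      simp only [pvHeads, List.map_cons, List.headD_cons]
      rw [ih (fun t ht => hall t (by simp [ht]))]
      rfl

theorem pvZipStarGo_closed {α : Type} (d : α) :
    ∀ (fuel : Nat) (r0 : List α) (rest : List (List α)),
      pvMinW r0.length rest ≤ fuel →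
      pvZipStarGo fuel (r0 :: rest) =
        (List.range (pvMinW r0.length rest)).map (fun i => (r0 :: rest).map (fun r => r.getD i d)) := by
  intro fuel
  induction fuel with
  | zero =>
    intro r0 rest h
    have : pvMinW r0.length rest = 0 := by omega
    simp [pvZipStarGo, this]
  | succ fuel ih =>
    intro r0 rest h
    by_cases hall : ∀ r ∈ (r0 :: rest), r ≠ []
    · have h1 : 1 ≤ r0.length := by
        have := hall r0 (by simp)
        cases r0 with
        | nil => simp at this
        | cons a as => simp
      obtain ⟨hm1, hmdrop⟩ := pvMinW_drop (fun t ht => hall t (List.mem_cons_of_mem _ ht)) r0.length h1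
      have hfuel : pvMinW (r0.drop 1).length (rest.map (List.drop 1)) ≤ fuel := by
        have h2 : pvMinW (r0.drop 1).length (rest.map (List.drop 1)) = pvMinW r0.length rest - 1 := by
          rw [List.length_drop]; exact hmdrop
        omega
      have ihh := ih (r0.drop 1) (rest.map (List.drop 1)) hfuel
      simp only [pvZipStarGo, pvHeads_some d hall]
      have hrw : (r0 :: rest).map (List.drop 1) = (r0.drop 1) :: rest.map (List.drop 1) := rfl
      rw [hrw, ihh, List.length_drop, hmdrop]
      obtain ⟨m, hm⟩ : ∃ m, pvMinW r0.length rest = m + 1 := ⟨pvMinW r0.length rest - 1, by omega⟩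
      rw [hm]
      simp only [Nat.add_sub_cancel, List.range_succ_eq_map, List.map_cons, List.map_map]
      congr 1
      · congr 1
        · cases r0 <;> simp
        · apply List.map_congr_left
          intro a _
          cases a <;> simp
      · apply List.map_congr_left
        intro i _
        simp [Function.comp]
    · push Not at hall
      obtain ⟨t, ht, hte⟩ := hall
      have hm0 : pvMinW r0.length rest = 0 := by
        rcases List.mem_cons.mp ht with h' | hmem
        · have hl : r0.length = 0 := by rw [← h', hte]; rfl
          have := pvMinW_le_init rest r0.length
          omega
        · have := pvMinW_le_mem hmem r0.length
          rw [hte] at this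
          simp at this
          omega
      simp [pvZipStarGo, pvHeads_none ⟨t, ht, hte⟩, hm0]

theorem pvZipStar_closed {α : Type} (d : α) (r0 : List α) (rest : List (List α)) :
    pvZipStar (r0 :: rest) =
      (List.range (pvMinW r0.length rest)).map (fun i => (r0 :: rest).map (fun r => r.getD i d)) := by
  exact pvZipStarGo_closed d r0.length r0 rest (pvMinW_le_init rest r0.length)

theorem pvSelf_range_getD {α : Type} (xs : List α) (d : α) :
    (List.range xs.length).map (fun i => xs.getD i d) = xs := by
  apply List.ext_getElem
  · simp
  · intro i h1 h2
    simp [List.getD_eq_getElem?_getD, List.getElem?_eq_getElem h2]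

theorem pvGetD_zipWith {α β γ : Type} (g : α → β → γ) (as : List α) (bs : List β)
    (i : Nat) (hi : i < as.length) (hj : i < bs.length) (da : α) (db : β) (dc : γ) :
    (List.zipWith g as bs).getD i dc = g (as.getD i da) (bs.getD i db) := by
  have hz : i < (List.zipWith g as bs).length := by simp [List.length_zipWith]; omega
  simp [List.getD_eq_getElem?_getD, List.getElem?_eq_getElem hz, List.getElem_zipWith,
    List.getElem?_eq_getElem hi, List.getElem?_eq_getElem hj]

theorem pvAcc_closed {β : Type} (f : β → Nat) (d : β) :
    ∀ (rest : List (List β)) (ws : List Nat),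
      rest.foldl (fun a row => List.zipWith (fun w c => max w (f c)) a row) ws
      = (List.range (pvMinW ws.length rest)).map
          (fun i => rest.foldl (fun a r => max a (f (r.getD i d))) (ws.getD i 0)) := by
  intro rest
  induction rest with
  | nil =>
    intro ws
    simp only [List.foldl_nil]
    exact (pvSelf_range_getD ws 0).symm
  | cons r1 rest ih =>
    intro ws
    simp only [List.foldl_cons]
    rw [ih (List.zipWith (fun w c => max w (f c)) ws r1)]
    have hlen : (List.zipWith (fun w c => max w (f c)) ws r1).length = min ws.length r1.length := by
      simp [List.length_zipWith]
    rw [hlen]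
    rw [show pvMinW ws.length (r1 :: rest) = pvMinW (min ws.length r1.length) rest from rfl]
    apply List.map_congr_left
    intro i hi
    have hiM : i < pvMinW (min ws.length r1.length) rest := List.mem_range.mp hi
    have hle := pvMinW_le_init rest (min ws.length r1.length)
    rw [pvGetD_zipWith (fun w c => max w (f c)) ws r1 i (by omega) (by omega) 0 d 0]

theorem pvWidths_eq (hs : List (List Char)) (r0 : List (List Char)) (rest : List (List (List Char))) :
    (hs.zip (pvZipStar (r0 :: rest))).map
        (fun p => (p.2.map (fun c => (PySem.Chars.strip c).length)).foldl max (PySem.Chars.strip p.1).length)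
    = List.zipWith (fun h w => max h.length w) (hs.map PySem.Chars.strip)
        (rest.foldl (fun a row => List.zipWith (fun w c => max w (PySem.Chars.strip c).length) a row)
          (r0.map (fun c => (PySem.Chars.strip c).length))) := by
  rw [pvZipStar_closed ([] : List Char)]
  rw [pvAcc_closed (fun c => (PySem.Chars.strip c).length) ([] : List Char)]
  rw [List.length_map]
  apply List.ext_getElem
  · simp [List.length_zipWith]
  · intro i h1 h2
    have hiM : i < pvMinW r0.length rest := by
      simp [List.length_zip] at h1; omega
    have hihs : i < hs.length := by
      simp [List.length_zip] at h1; omega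
    have hir0 : i < r0.length := lt_of_lt_of_le hiM (pvMinW_le_init rest r0.length)
    simp only [List.getElem_zipWith, List.getElem_map, List.getElem_zip, List.getElem_range]
    rw [List.getD_eq_getElem?_getD, List.getElem?_eq_getElem (by simpa using hir0 :
          i < (r0.map (fun c => (PySem.Chars.strip c).length)).length)]
    simp only [List.getElem_map, List.map_cons, List.foldl_cons, List.foldl_map]
    rw [List.getD_eq_getElem?_getD, List.getElem?_eq_getElem hir0]
    simp only [Option.getD_some]
    simp only [← List.foldl_map (f := fun r : List (List Char) => (PySem.Chars.strip (r.getD i [])).length) (g := max)]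
    exact List.foldl_assoc

-- ===== VERDICT (by name: the statement is the Claim_ definition above) =====
theorem align_markdown_table_spec : Claim_unchanged_align_markdown_table := by
  intro md _hdom hnD
  unfold D_align_markdown_table at hnD
  simp only [align_markdown_table, align_markdown_table_alt]
  cases hdrop : (PySem.Chars.splitOn (PySem.Chars.strip md.toList) ['\n']).drop 2 with
  | nil =>
    have hlen : (PySem.Chars.splitOn (PySem.Chars.strip md.toList) ['\n']).length ≤ 2 := by
      have := congrArg List.length hdrop
      simp only [List.length_drop, List.length_nil] at this
      omega
    have hhs := pvNoData_cases (PySem.Chars.strip md.toList) hlen hnD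
    simp only [List.map_nil, pvZipStar_nil, List.zip_nil_right]
    rcases hhs with hhs | hhs <;> rw [hhs] <;> decide
  | cons l0 ls' =>
    simp only [List.map_cons]
    rw [pvWidths_eq]

theorem align_markdown_table_changed : Claim_changed_align_markdown_table := by
  unfold Claim_changed_align_markdown_table; decide
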